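-- pv_equiv track=rewrite | github.com/Ruales1138/Analisis-Y-Diseno-De-Algoritmos | recurcion_cola_no_cola/cadena_non_tail.py | cadena_non_tail
-- ===== SOURCE A (Python) =====
-- def cadena_non_tail(matriz, i, j, direccion=None):
--     if direccion is None:
--         return f'Horizontal izquierda: {cadena_non_tail(matriz, i, j, True)}\nVertical abajo: {cadena_non_tail(matriz, i, j, False)}'
--     if direccion:
--         if j == -1:
--             return ''
--         return matriz[i][j] + cadena_non_tail(matriz, i, j-1, direccion)
--     else:
--         if i == len(matriz):
--             return ''
--         return matriz[i][j] + cadena_non_tail(matriz, i+1, j, direccion)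
-- ===== SOURCE B (Python) =====
-- def cadena_non_tail(matriz, i, j, direccion=None):
--     if direccion is None:
--         return f'Horizontal izquierda: {cadena_non_tail(matriz, i, j, True)}\nVertical abajo: {cadena_non_tail(matriz, i, j, False)}'
--     if direccion:
--         if j == -1:
--             return ''
--         return ''.join(reversed(matriz[i][:j+1]))
--     else:
--         return ''.join(matriz[k][j] for k in range(i, len(matriz)))
-- ===== Notes on version B (the rewrite author's own statement) =====
-- stated objective: alternative
-- what changed: A's two non-tail recursions are replaced by closed, non-recursive expressions: the horizontal string is the join of the reversed row prefix matriz[i][:j+1], and the vertical string is a join over a generator indexing matriz[k][j] for k in range(i, len(matriz)).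
import Mathlib
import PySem

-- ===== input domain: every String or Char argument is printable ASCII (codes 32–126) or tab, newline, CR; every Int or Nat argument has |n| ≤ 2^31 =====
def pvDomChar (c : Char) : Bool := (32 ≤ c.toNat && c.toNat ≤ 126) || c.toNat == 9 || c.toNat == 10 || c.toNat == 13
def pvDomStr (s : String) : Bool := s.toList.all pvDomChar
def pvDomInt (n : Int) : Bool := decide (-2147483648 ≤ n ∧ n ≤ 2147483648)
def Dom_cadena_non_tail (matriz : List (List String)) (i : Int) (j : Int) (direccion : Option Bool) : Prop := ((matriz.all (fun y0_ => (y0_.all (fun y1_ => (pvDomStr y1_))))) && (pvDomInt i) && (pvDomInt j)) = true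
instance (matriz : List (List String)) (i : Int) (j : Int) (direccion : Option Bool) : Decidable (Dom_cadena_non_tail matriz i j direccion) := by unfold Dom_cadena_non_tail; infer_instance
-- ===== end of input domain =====

-- B replaces A's two non-tail recursions by non-recursive slice/comprehension expressions:
-- horizontal = join of the reversed row prefix matriz[i][:j+1], vertical = join over range(i, len(matriz)).

-- range fact extracted from a successful Python index; cited by port A's decreasing_by
theorem inrange_of_pyGet?_some {α : Type} {xs : List α} {k : Int} {x : α}
    (h : PySem.List.pyGet? xs k = some x) : -(xs.length : Int) ≤ k ∧ k < xs.length := by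
  have hn : ¬ PySem.List.pyGet? xs k = none := by simp [h]
  rw [PySem.List.pyGet?_eq_none_iff, not_not] at hn
  simpa [PySem.Raise.InRange] using hn

-- ===== PORT A =====
-- horizontal branch of A: matriz[i][j] + rec(j-1) until j == -1 (returns "" where Python raises IndexError)
def cadena_non_tail_h (matriz : List (List String)) (i : Int) (j : Int) : String :=
  if j = -1 then ""
  else
    match h : (PySem.List.pyGet? matriz i).bind (fun r => PySem.List.pyGet? r j) with
    | none => ""   -- Python raises IndexError here (outside Pre_)
    | some s => s ++ cadena_non_tail_h matriz i (j - 1)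
termination_by (j + ((PySem.List.pyGet? matriz i).getD []).length + 1).toNat
decreasing_by
  obtain ⟨r, hr, hs⟩ := Option.bind_eq_some_iff.mp h
  have := inrange_of_pyGet?_some hs
  rw [hr]
  simp only [Option.getD_some]
  omega

-- vertical branch of A: matriz[i][j] + rec(i+1) until i == len(matriz)
def cadena_non_tail_v (matriz : List (List String)) (i : Int) (j : Int) : String :=
  if i = (matriz.length : Int) then ""
  else
    match h : (PySem.List.pyGet? matriz i).bind (fun r => PySem.List.pyGet? r j) with
    | none => ""   -- Python raises IndexError here (outside Pre_)
    | some s => s ++ cadena_non_tail_v matriz (i + 1) j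
termination_by ((matriz.length : Int) - i).toNat
decreasing_by
  obtain ⟨r, hr, hs⟩ := Option.bind_eq_some_iff.mp h
  have := inrange_of_pyGet?_some hr
  omega

def cadena_non_tail (matriz : List (List String)) (i : Int) (j : Int) (direccion : Option Bool) : String :=
  match direccion with
  | none => "Horizontal izquierda: " ++ cadena_non_tail_h matriz i j ++ "\nVertical abajo: " ++ cadena_non_tail_v matriz i j
  | some true => cadena_non_tail_h matriz i j
  | some false => cadena_non_tail_v matriz i j

-- ===== PORT B =====
-- B's horizontal: ''.join(reversed(matriz[i][:j+1])); matriz[i] raises outside range (outside Pre_), ported with getD []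
def cadena_alt_h (matriz : List (List String)) (i : Int) (j : Int) : String :=
  if j = -1 then ""
  else String.join (PySem.List.slice ((PySem.List.pyGet? matriz i).getD []) none (some (j + 1))).reverse

-- B's vertical: ''.join(matriz[k][j] for k in range(i, len(matriz))); each failing index is a Python IndexError (outside Pre_), ported with getD ""
def cadena_alt_v (matriz : List (List String)) (i : Int) (j : Int) : String :=
  String.join ((PySem.List.pyRange i (matriz.length : Int) 1).map
    (fun k => ((PySem.List.pyGet? matriz k).bind (fun r => PySem.List.pyGet? r j)).getD ""))

def cadena_non_tail_alt (matriz : List (List String)) (i : Int) (j : Int) (direccion : Option Bool) : String :=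
  match direccion with
  | none => "Horizontal izquierda: " ++ cadena_alt_h matriz i j ++ "\nVertical abajo: " ++ cadena_alt_v matriz i j
  | some true => cadena_alt_h matriz i j
  | some false => cadena_alt_v matriz i j

-- ===== PRECONDITION & SPEC =====
-- Pre_ excludes exactly the inputs on which the Python A raises IndexError:
-- an index out of range in the walked row/column, or j < -1 so the horizontal walk never reaches -1.
def Pre_h (matriz : List (List String)) (i : Int) (j : Int) : Prop :=
  j = -1 ∨ (-1 ≤ j ∧ j < (((PySem.List.pyGet? matriz i).getD []).length : Int) ∧ PySem.Raise.InRange matriz.length i)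

def Pre_v (matriz : List (List String)) (i : Int) (j : Int) : Prop :=
  i = (matriz.length : Int) ∨
    (PySem.Raise.InRange matriz.length i ∧
      if 0 ≤ i then ∀ r ∈ matriz.drop i.toNat, PySem.Raise.InRange r.length j
      else ∀ r ∈ matriz, PySem.Raise.InRange r.length j)

def Pre_cadena_non_tail (matriz : List (List String)) (i : Int) (j : Int) (direccion : Option Bool) : Prop :=
  (direccion = none → Pre_h matriz i j ∧ Pre_v matriz i j) ∧
  (direccion = some true → Pre_h matriz i j) ∧
  (direccion = some false → Pre_v matriz i j)

instance (matriz : List (List String)) (i : Int) (j : Int) (direccion : Option Bool) : Decidable (Pre_cadena_non_tail matriz i j direccion) := by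
  unfold Pre_cadena_non_tail Pre_h Pre_v; infer_instance

def pvWitness_cadena_non_tail : List (List String) × Int × Int × Option Bool := ([["a", "b"], ["c", "d"]], 0, 1, none)

def Spec_cadena_non_tail (matriz : List (List String)) (i : Int) (j : Int) (direccion : Option Bool) (out : String) : Prop := out = cadena_non_tail_alt matriz i j direccion
instance (matriz : List (List String)) (i : Int) (j : Int) (direccion : Option Bool) (out : String) : Decidable (Spec_cadena_non_tail matriz i j direccion out) := by unfold Spec_cadena_non_tail; infer_instance

-- ===== CLAIM (what is proved, stated in full; the proofs are below) =====
def Claim_equal_cadena_non_tail : Prop := ∀ (matriz : List (List String)) (i : Int) (j : Int) (direccion : Option Bool), Dom_cadena_non_tail matriz i j direccion → Pre_cadena_non_tail matriz i j direccion → Spec_cadena_non_tail matriz i j direccion (cadena_non_tail matriz i j direccion)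

-- ===== LEMMAS AND PROOFS =====
theorem join_cons (a : String) (l : List String) : String.join (a :: l) = a ++ String.join l := by
  induction l generalizing a with
  | nil => simp [String.join]
  | cons b t ih =>
    have h1 : String.join (a :: b :: t) = String.join ((a ++ b) :: t) := by simp [String.join]
    rw [h1, ih (a ++ b), ih b, String.append_assoc]

-- horizontal agreement: A's walk down from j equals the reversed prefix join, for row in range and j < len row
theorem h_eq_aux (matriz : List (List String)) (i : Int) (row : List String)
    (hrow : PySem.List.pyGet? matriz i = some row) :
    ∀ n : Nat, n ≤ row.length →
      cadena_non_tail_h matriz i ((n : Int) - 1) = String.join (row.take n).reverse := by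
  intro n
  induction n with
  | zero => intro _; rw [cadena_non_tail_h]; simp [String.join]
  | succ m ih =>
    intro hn
    rw [cadena_non_tail_h]
    have hj : ¬ ((m + 1 : Nat) : Int) - 1 = -1 := by push_cast; omega
    rw [if_neg hj]
    have hm : m < row.length := by omega
    have hget : PySem.List.pyGet? row (((m + 1 : Nat) : Int) - 1) = some row[m] := by
      have : (((m + 1 : Nat) : Int) - 1) = ((m : Nat) : Int) := by push_cast; omega
      rw [this, PySem.List.pyGet?_natCast]
      exact List.getElem?_eq_getElem hm
    have hb : (PySem.List.pyGet? matriz i).bind (fun r => PySem.List.pyGet? r (((m+1:Nat):Int) - 1)) = some row[m] := by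
      rw [hrow]; simpa using hget
    split
    · simp_all
    · rename_i s hs
      rw [hb] at hs
      injection hs with hs
      subst hs
      have hstep : (((m + 1 : Nat) : Int) - 1) - 1 = ((m : Nat) : Int) - 1 := by push_cast; ring
      rw [hstep, ih (by omega)]
      rw [List.take_succ, List.getElem?_eq_getElem hm]
      simp only [Option.toList_some, List.reverse_append, List.reverse_singleton, List.singleton_append]
      rw [join_cons]

-- vertical agreement under Pre_v, by fuel on (len - i)
theorem v_eq_aux (matriz : List (List String)) (j : Int) :
    ∀ (n : Nat) (i : Int), ((matriz.length : Int) - i).toNat ≤ n → Pre_v matriz i j →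
      cadena_non_tail_v matriz i j = cadena_alt_v matriz i j := by
  intro n
  induction n with
  | zero =>
    intro i hn hpre
    have hi : i = (matriz.length : Int) := by
      rcases hpre with h | ⟨hin, _⟩
      · exact h
      · exfalso; simp [PySem.Raise.InRange] at hin; omega
    rw [cadena_non_tail_v, if_pos hi]
    unfold cadena_alt_v
    rw [hi, PySem.List.pyRange_one_eq_nil le_rfl]
    simp [String.join]
  | succ m ih =>
    intro i hn hpre
    rcases hpre with hi | ⟨hin, hall⟩
    · rw [cadena_non_tail_v, if_pos hi]
      unfold cadena_alt_v
      rw [hi, PySem.List.pyRange_one_eq_nil le_rfl]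
      simp [String.join]
    · have hrange := hin
      simp only [PySem.Raise.InRange] at hrange
      have hilt : i < (matriz.length : Int) := hrange.2
      have hine : ¬ i = (matriz.length : Int) := by omega
      -- the row A and B both read at index i
      obtain ⟨row, hrow⟩ : ∃ r, PySem.List.pyGet? matriz i = some r := by
        rcases h : PySem.List.pyGet? matriz i with _ | r
        · exfalso; rw [PySem.List.pyGet?_eq_none_iff] at h; exact h hin
        · exact ⟨r, rfl⟩
      have hrmem : row ∈ matriz := PySem.List.mem_of_pyGet?_eq_some matriz hrow
      have hjrow : PySem.Raise.InRange row.length j := by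
        by_cases hi0 : 0 ≤ i
        · rw [if_pos hi0] at hall
          apply hall
          have hlt : i.toNat < matriz.length := by omega
          have heq : matriz[i.toNat] = row := by
            have h2 : PySem.List.pyGet? matriz ((i.toNat : Nat) : Int) = some matriz[i.toNat] := by
              rw [PySem.List.pyGet?_natCast]
              exact List.getElem?_eq_getElem hlt
            rw [Int.toNat_of_nonneg hi0] at h2
            rw [hrow] at h2
            injection h2 with h2
            exact h2.symm
          rw [← heq, List.drop_eq_getElem_cons hlt]
          exact List.mem_cons_self
        · rw [if_neg hi0] at hall
          exact hall row hrmem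
      obtain ⟨s, hs⟩ : ∃ s, PySem.List.pyGet? row j = some s := by
        rcases h : PySem.List.pyGet? row j with _ | s
        · exfalso; rw [PySem.List.pyGet?_eq_none_iff] at h; exact h hjrow
        · exact ⟨s, rfl⟩
      have hb : (PySem.List.pyGet? matriz i).bind (fun r => PySem.List.pyGet? r j) = some s := by
        rw [hrow]; simpa using hs
      -- Pre_v holds at i + 1
      have hpre' : Pre_v matriz (i + 1) j := by
        by_cases he : i + 1 = (matriz.length : Int)
        · exact Or.inl he
        · refine Or.inr ⟨by simp [PySem.Raise.InRange]; omega, ?_⟩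
          by_cases hi1 : 0 ≤ i + 1
          · rw [if_pos hi1]
            intro r hr
            by_cases hi0 : 0 ≤ i
            · rw [if_pos hi0] at hall
              apply hall
              have hlt : i.toNat < matriz.length := by omega
              have h1 : (i + 1).toNat = i.toNat + 1 := by omega
              rw [h1] at hr
              rw [List.drop_eq_getElem_cons hlt]
              exact List.mem_cons_of_mem _ hr
            · rw [if_neg hi0] at hall
              exact hall r (List.mem_of_mem_drop hr)
          · rw [if_neg hi1]
            intro r hr
            rw [if_neg (by omega : ¬ 0 ≤ i)] at hall
            exact hall r hr
      -- unfold A one step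
      rw [cadena_non_tail_v, if_neg hine]
      have hmeas : ((matriz.length : Int) - (i + 1)).toNat ≤ m := by omega
      -- unfold B one step
      have hBstep : cadena_alt_v matriz i j = s ++ cadena_alt_v matriz (i + 1) j := by
        unfold cadena_alt_v
        rw [PySem.List.pyRange_one_cons hilt]
        rw [List.map_cons, join_cons, hb]
        rfl
      rw [hBstep, ← ih (i + 1) hmeas hpre']
      split
      · simp_all
      · rename_i s' hs'
        rw [hb] at hs'
        injection hs' with hs'
        rw [hs']

-- horizontal agreement under Pre_h
theorem h_eq (matriz : List (List String)) (i j : Int) (hpre : Pre_h matriz i j) :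
    cadena_non_tail_h matriz i j = cadena_alt_h matriz i j := by
  rcases hpre with hj | ⟨hj1, hj2, hin⟩
  · rw [cadena_non_tail_h, cadena_alt_h, if_pos hj, if_pos hj]
  · by_cases hjm : j = -1
    · rw [cadena_non_tail_h, cadena_alt_h, if_pos hjm, if_pos hjm]
    · have hj0 : 0 ≤ j := by omega
      obtain ⟨row, hrow⟩ : ∃ r, PySem.List.pyGet? matriz i = some r := by
        rcases h : PySem.List.pyGet? matriz i with _ | r
        · exfalso; rw [PySem.List.pyGet?_eq_none_iff] at h; exact h hin
        · exact ⟨r, rfl⟩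
      rw [hrow] at hj2
      simp only [Option.getD_some] at hj2
      have hn : (j + 1).toNat ≤ row.length := by omega
      have hji : j = (((j + 1).toNat : Nat) : Int) - 1 := by omega
      rw [cadena_alt_h, if_neg hjm, hrow]
      simp only [Option.getD_some]
      rw [PySem.List.slice_to row (by omega : (0:Int) ≤ j + 1)]
      rw [hji, h_eq_aux matriz i row hrow (j + 1).toNat hn]
      have harg : ((((j + 1).toNat : Nat) : Int) - 1 + 1).toNat = (j + 1).toNat := by omega
      rw [harg]

-- ===== VERDICT (by name: the statement is the Claim_ definition above) =====
theorem cadena_non_tail_spec : Claim_equal_cadena_non_tail := by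
  intro matriz i j direccion _ hpre
  obtain ⟨h0, h1, h2⟩ := hpre
  unfold Spec_cadena_non_tail cadena_non_tail cadena_non_tail_alt
  rcases direccion with _ | b
  · obtain ⟨ph, pv⟩ := h0 rfl
    rw [h_eq matriz i j ph, v_eq_aux matriz j _ i le_rfl pv]
  · rcases b with _ | _
    · exact v_eq_aux matriz j _ i le_rfl (h2 rfl)
    · exact h_eq matriz i j (h1 rfl)
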